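-- pv_equiv track=rewrite | github.com/westlake-repl/Cryo-IEF | Other_tools/select_particles.py | divide_selected_particles_id
-- ===== SOURCE A (Python) =====
-- def divide_selected_particles_id(clustering_result, selected_classes,uncertainty_list=None):
--     selected_particles = []
--     selected_particles_uncertainty = []
--     unselected_particles = []
--     unselected_particles_uncertainty = []
--     for i in selected_classes:
--         # selected_particles += clustering_result[clustering_result['clustering_results'] == i].index.tolist()
--         selected_particles += [index for index,j in enumerate(clustering_result) if j==i]
--         unselected_particles += [index for index,j in enumerate(clustering_result) if j!=i]
--     if uncertainty_list is not None:
--         for i in selected_classes: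
--             selected_particles_uncertainty += [uncertainty_list[index] for index,j in enumerate(clustering_result) if j==i]
--             unselected_particles_uncertainty += [uncertainty_list[index] for index,j in enumerate(clustering_result) if j!=i]
--     return selected_particles, unselected_particles, selected_particles_uncertainty, unselected_particles_uncertainty
-- ===== SOURCE B (Python) =====
-- def divide_selected_particles_id(clustering_result, selected_classes, uncertainty_list=None):
--     # One pass builds a class -> index-list table; per-class lists are then
--     # concatenated for the selected side and complemented (against range(n))
--     # for the unselected side; uncertainties are indexed off the final lists.
--     groups = {}
--     for idx, c in enumerate(clustering_result):
--         groups[c] = groups.get(c, []) + [idx]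
--     n = len(clustering_result)
--     selected_particles = []
--     unselected_particles = []
--     for c in selected_classes:
--         g = groups.get(c, [])
--         selected_particles += g
--         gs = set(g)
--         unselected_particles += [k for k in range(n) if k not in gs]
--     if uncertainty_list is None:
--         return selected_particles, unselected_particles, [], []
--     return (selected_particles, unselected_particles,
--             [uncertainty_list[k] for k in selected_particles],
--             [uncertainty_list[k] for k in unselected_particles])
-- ===== Notes on version B (the rewrite author's own statement) =====
-- stated objective: alternative
-- what changed: B builds a class->indices table in one pass over enumerate(clustering_result), assembles the selected side by concatenating per-class table entries, forms the unselected side as the set-complement of each entry against range(n), and derives both uncertainty lists by indexing uncertainty_list with the already-built index lists instead of re-scanning clustering_result.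
import Mathlib
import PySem

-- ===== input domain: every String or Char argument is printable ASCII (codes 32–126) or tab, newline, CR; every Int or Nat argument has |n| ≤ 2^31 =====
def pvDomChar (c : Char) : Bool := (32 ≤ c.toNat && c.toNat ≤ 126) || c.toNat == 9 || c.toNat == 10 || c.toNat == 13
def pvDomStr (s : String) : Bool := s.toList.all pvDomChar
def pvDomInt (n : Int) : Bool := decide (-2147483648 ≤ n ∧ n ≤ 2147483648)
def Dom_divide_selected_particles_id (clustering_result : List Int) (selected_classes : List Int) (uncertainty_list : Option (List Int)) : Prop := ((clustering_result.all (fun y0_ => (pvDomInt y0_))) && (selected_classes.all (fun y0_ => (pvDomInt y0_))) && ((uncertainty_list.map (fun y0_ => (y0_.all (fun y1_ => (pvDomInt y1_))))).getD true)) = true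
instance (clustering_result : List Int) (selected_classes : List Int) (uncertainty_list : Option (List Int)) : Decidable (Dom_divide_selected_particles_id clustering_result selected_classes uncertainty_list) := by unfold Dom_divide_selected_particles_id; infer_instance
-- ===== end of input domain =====

-- B replaces A's per-class rescans of clustering_result by a one-pass class->indices table,
-- complements table entries against range(n) for the unselected side, and indexes
-- uncertainty_list off the already-built index lists (objective: alternative, same cost).

-- ===== PORT A =====
-- 'uncertainty_list[index]' is ported as pyGetD _ _ 0: Pre_ excludes the inputs where Python raises IndexError.
def divide_selected_particles_id (clustering_result : List Int) (selected_classes : List Int) (uncertainty_list : Option (List Int)) : List Int × List Int × List Int × List Int :=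
  let su := selected_classes.foldl (fun acc i =>
      (acc.1 ++ ((PySem.List.enumerate clustering_result 0).filter (fun p => p.2 == i)).map (fun p => p.1),
       acc.2 ++ ((PySem.List.enumerate clustering_result 0).filter (fun p => !(p.2 == i))).map (fun p => p.1)))
    (([] : List Int), ([] : List Int))
  match uncertainty_list with
  | none => (su.1, su.2, ([] : List Int), ([] : List Int))
  | some u =>
    let suu := selected_classes.foldl (fun acc i =>
        (acc.1 ++ ((PySem.List.enumerate clustering_result 0).filter (fun p => p.2 == i)).map (fun p => PySem.List.pyGetD u p.1 0),
         acc.2 ++ ((PySem.List.enumerate clustering_result 0).filter (fun p => !(p.2 == i))).map (fun p => PySem.List.pyGetD u p.1 0)))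
      (([] : List Int), ([] : List Int))
    (su.1, su.2, suu.1, suu.2)

-- ===== PORT B =====
-- 'groups[c] = groups.get(c, []) + [idx]' over enumerate(clustering_result)
def altGroups (clustering_result : List Int) : PySem.Dict Int (List Int) :=
  (PySem.List.enumerate clustering_result 0).foldl
    (fun d p => d.modify p.2 [] (fun g => g ++ [p.1])) PySem.Dict.empty

def divide_selected_particles_id_alt (clustering_result : List Int) (selected_classes : List Int) (uncertainty_list : Option (List Int)) : List Int × List Int × List Int × List Int :=
  let groups := altGroups clustering_result
  let su := selected_classes.foldl (fun acc c =>
      (acc.1 ++ groups.getD c [],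
       acc.2 ++ (PySem.List.pyRange 0 (clustering_result.length : Int) 1).filter
                  (fun k => !(PySem.Set.ofList (groups.getD c [])).contains k)))
    (([] : List Int), ([] : List Int))
  match uncertainty_list with
  | none => (su.1, su.2, ([] : List Int), ([] : List Int))
  | some u => (su.1, su.2, su.1.map (fun k => PySem.List.pyGetD u k 0),
               su.2.map (fun k => PySem.List.pyGetD u k 0))

-- ===== PRECONDITION & SPEC =====
-- Pre_ excludes exactly the inputs on which the Python A raises IndexError (uncertainty_list
-- present but shorter than clustering_result, with at least one selected class); B raises there too.
def Pre_divide_selected_particles_id (clustering_result : List Int) (selected_classes : List Int) (uncertainty_list : Option (List Int)) : Prop :=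
  selected_classes = [] ∨
    clustering_result.length ≤ (uncertainty_list.map List.length).getD clustering_result.length
instance (clustering_result : List Int) (selected_classes : List Int) (uncertainty_list : Option (List Int)) : Decidable (Pre_divide_selected_particles_id clustering_result selected_classes uncertainty_list) := by unfold Pre_divide_selected_particles_id; infer_instance

def pvWitness_divide_selected_particles_id : List Int × List Int × Option (List Int) :=
  ([0, 1, 0, 2], [0, 2], some [5, 6, 7, 8])

def Spec_divide_selected_particles_id (clustering_result : List Int) (selected_classes : List Int) (uncertainty_list : Option (List Int)) (out : List Int × List Int × List Int × List Int) : Prop := out = divide_selected_particles_id_alt clustering_result selected_classes uncertainty_list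
instance (clustering_result : List Int) (selected_classes : List Int) (uncertainty_list : Option (List Int)) (out : List Int × List Int × List Int × List Int) : Decidable (Spec_divide_selected_particles_id clustering_result selected_classes uncertainty_list out) := by unfold Spec_divide_selected_particles_id; infer_instance

-- ===== CLAIM (what is proved, stated in full; the proofs are below) =====
def Claim_equal_divide_selected_particles_id : Prop := ∀ (clustering_result : List Int) (selected_classes : List Int) (uncertainty_list : Option (List Int)), Dom_divide_selected_particles_id clustering_result selected_classes uncertainty_list → Pre_divide_selected_particles_id clustering_result selected_classes uncertainty_list → Spec_divide_selected_particles_id clustering_result selected_classes uncertainty_list (divide_selected_particles_id clustering_result selected_classes uncertainty_list)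

-- ===== LEMMAS AND PROOFS =====

-- the table entry for class c is exactly A's "== c" comprehension
theorem altGroups_getD (cr : List Int) (c : Int) :
    (altGroups cr).getD c []
      = ((PySem.List.enumerate cr 0).filter (fun p => p.2 == c)).map (fun p => p.1) := by
  unfold altGroups
  have h := PySem.Dict.getD_foldl_modify_append
    (l := (PySem.List.enumerate cr 0).map Prod.swap) (d := PySem.Dict.empty) (c := c)
  simp [List.foldl_map, List.filter_map, List.map_map, Prod.swap] at h
  exact h

-- complement of the "== c" indices inside the full index list is the "!= c" index list
theorem compl_general (e : List (Int × Int)) (c : Int) (hn : (e.map (fun p => p.1)).Nodup) :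
    (e.map (fun p => p.1)).filter
        (fun k => !decide (k ∈ (e.filter (fun p => p.2 == c)).map (fun p => p.1)))
      = (e.filter (fun p => !(p.2 == c))).map (fun p => p.1) := by
  induction e with
  | nil => simp
  | cons p e ih =>
    simp only [List.map_cons, List.nodup_cons] at hn
    obtain ⟨hp, hn'⟩ := hn
    have htail : ∀ k ∈ e.map (fun p => p.1),
        (!decide (k ∈ ((p :: e).filter (fun q => q.2 == c)).map (fun q => q.1)))
          = (!decide (k ∈ (e.filter (fun q => q.2 == c)).map (fun q => q.1))) := by
      intro k hk
      have hkne : k ≠ p.1 := fun h => hp (h ▸ hk)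
      by_cases hc : p.2 = c
      · simp [hc, hkne]
      · simp [hc]
    by_cases hc : p.2 = c
    · have hcond : (!decide (p.1 ∈ ((p :: e).filter (fun q => q.2 == c)).map (fun q => q.1))) = false := by
        simp [hc]
      rw [List.map_cons, List.filter_cons, hcond]
      simp only [Bool.false_eq_true, if_false]
      rw [List.filter_congr htail, ih hn']
      rw [List.filter_cons]
      simp [hc]
    · have hnotmem : p.1 ∉ ((p :: e).filter (fun q => q.2 == c)).map (fun q => q.1) := by
        simp only [List.filter_cons]
        have hb : (p.2 == c) = false := by simp [hc]
        rw [hb]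
        simp only [List.mem_map]
        rintro ⟨q, hq, hq1⟩
        exact hp (hq1 ▸ List.mem_map_of_mem (List.mem_of_mem_filter hq))
      have hcond : (!decide (p.1 ∈ ((p :: e).filter (fun q => q.2 == c)).map (fun q => q.1))) = true := by
        simpa using hnotmem
      rw [List.map_cons, List.filter_cons, hcond]
      simp only [if_true]
      rw [List.filter_congr htail, ih hn']
      rw [List.filter_cons]
      simp [hc]

theorem compl_enum (cr : List Int) (c : Int) :
    (PySem.List.pyRange 0 (cr.length : Int) 1).filter
        (fun k => !(PySem.Set.ofList ((altGroups cr).getD c [])).contains k)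
      = ((PySem.List.enumerate cr 0).filter (fun p => !(p.2 == c))).map (fun p => p.1) := by
  have hfst : (PySem.List.enumerate cr 0).map (fun p => p.1) = PySem.List.pyRange 0 (cr.length : Int) 1 := by
    simpa using PySem.List.map_fst_enumerate cr 0
  have hnd : ((PySem.List.enumerate cr 0).map (fun p => p.1)).Nodup := by
    rw [hfst]; exact PySem.List.nodup_pyRange_one 0 _
  have h := compl_general (PySem.List.enumerate cr 0) c hnd
  rw [hfst] at h
  rw [← h, altGroups_getD]
  apply List.filter_congr
  intro k hk
  simp [pysem]

-- ===== VERDICT (by name: the statement is the Claim_ definition above) =====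
theorem fold_su_eq (cr sc : List Int) :
    sc.foldl (fun acc c =>
      (acc.1 ++ (altGroups cr).getD c [],
       acc.2 ++ (PySem.List.pyRange 0 (cr.length : Int) 1).filter
                  (fun k => !(PySem.Set.ofList ((altGroups cr).getD c [])).contains k)))
      (([] : List Int), ([] : List Int))
    = sc.foldl (fun acc i =>
      (acc.1 ++ ((PySem.List.enumerate cr 0).filter (fun p => p.2 == i)).map (fun p => p.1),
       acc.2 ++ ((PySem.List.enumerate cr 0).filter (fun p => !(p.2 == i))).map (fun p => p.1)))
      (([] : List Int), ([] : List Int)) := by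
  apply PySem.List.foldl_congr_mem
  intro acc c _
  rw [compl_enum, altGroups_getD]

theorem divide_selected_particles_id_spec : Claim_equal_divide_selected_particles_id := by
  intro cr sc ul _ _
  unfold Spec_divide_selected_particles_id divide_selected_particles_id divide_selected_particles_id_alt
  cases ul with
  | none => simp only [fold_su_eq]
  | some u =>
    simp only [fold_su_eq]
    rw [PySem.List.foldl_prod_mk
          (f := fun acc i => acc ++ ((PySem.List.enumerate cr 0).filter (fun p => p.2 == i)).map (fun p => PySem.List.pyGetD u p.1 0))
          (g := fun acc i => acc ++ ((PySem.List.enumerate cr 0).filter (fun p => !(p.2 == i))).map (fun p => PySem.List.pyGetD u p.1 0)),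
        PySem.List.foldl_prod_mk
          (f := fun acc i => acc ++ ((PySem.List.enumerate cr 0).filter (fun p => p.2 == i)).map (fun p => p.1))
          (g := fun acc i => acc ++ ((PySem.List.enumerate cr 0).filter (fun p => !(p.2 == i))).map (fun p => p.1)),
        PySem.List.foldl_append_eq_flatMap, PySem.List.foldl_append_eq_flatMap,
        PySem.List.foldl_append_eq_flatMap, PySem.List.foldl_append_eq_flatMap]
    simp [List.map_flatMap, List.map_map, Function.comp_def]
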